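-- pv_equiv track=rewrite | github.com/M2V7K/cfg-nano-github-hwk-tests | phrase_character_hwk.py | generate_phrase
-- ===== SOURCE A (Python) =====
-- def generate_phrase(characters, phrase):
--     tc = set(characters)
--
--     cd = dict()
--     cd1 = dict()
--     for i in tc:
--         count = 0
--         for j in characters:
--             if i == j:
--                 count += 1
--         cd[i] = count
--         cd1[i] = 0
--
--     tc1 = set(phrase)
--
--     for i in tc1:
--         count = 0
--         for j in phrase:
--             if i == j:
--                 count += 1
--         cd1[i] = count
--         if not i in cd.keys():
--             cd[i] = 0
--
--     for k,v in cd.items():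
--         if cd[k] < cd1[k]:
--                 return False
--     return True
-- ===== SOURCE B (Python) =====
-- def generate_phrase(characters, phrase):
--     pool = list(characters)
--     for c in phrase:
--         if c in pool:
--             pool.remove(c)
--         else:
--             return False
--     return True
-- ===== Notes on version B (the rewrite author's own statement) =====
-- stated objective: simpler
-- what changed: Replaces A's build-two-count-dicts-then-compare strategy (set of chars, nested counting loops, final dict comparison) with a single pass over the phrase that consumes characters from a shrinking pool copied from `characters`, returning False as soon as a needed character is missing.
import Mathlib
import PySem

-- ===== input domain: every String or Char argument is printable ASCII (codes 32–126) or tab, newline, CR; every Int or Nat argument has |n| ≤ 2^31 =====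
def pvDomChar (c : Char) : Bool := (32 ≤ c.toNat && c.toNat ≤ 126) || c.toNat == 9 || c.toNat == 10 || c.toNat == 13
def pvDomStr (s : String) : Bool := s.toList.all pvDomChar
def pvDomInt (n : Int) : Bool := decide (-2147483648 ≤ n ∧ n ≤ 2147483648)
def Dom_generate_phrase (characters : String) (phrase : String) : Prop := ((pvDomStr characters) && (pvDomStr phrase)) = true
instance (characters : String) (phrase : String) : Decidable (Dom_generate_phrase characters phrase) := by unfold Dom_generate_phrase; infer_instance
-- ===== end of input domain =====

-- B replaces A's two-count-dicts-then-compare strategy with one pass over the phrase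
-- consuming characters from a pool copied from `characters` (simpler; no speed claim).

-- ===== PORT A =====
-- inner counting loop: 'count = 0; for j in s: if i == j: count += 1'
def pvCountA (i : Char) (s : List Char) : Int :=
  s.foldl (fun count j => if i == j then count + 1 else count) 0

-- first loop: 'for i in tc: cd[i] = count; cd1[i] = 0' (cd, cd1 carried as a pair)
def pvLoop1 (cs : List Char) (tc : List Char) :
    PySem.Dict Char Int × PySem.Dict Char Int :=
  tc.foldl (fun p i => (p.1.insert i (pvCountA i cs), p.2.insert i 0))
    (PySem.Dict.empty, PySem.Dict.empty)

-- second loop: 'for i in tc1: cd1[i] = count; if not i in cd.keys(): cd[i] = 0'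
def pvLoop2 (ph : List Char) (tc1 : List Char)
    (st : PySem.Dict Char Int × PySem.Dict Char Int) :
    PySem.Dict Char Int × PySem.Dict Char Int :=
  tc1.foldl (fun p i =>
    ((if p.1.contains i then p.1 else p.1.insert i 0), p.2.insert i (pvCountA i ph))) st

-- final loop with early return; cd[k] / cd1[k] read via getD 0 (both keys always present)
def pvLoop3 (cd cd1 : PySem.Dict Char Int) : List (Char × Int) → Bool
  | [] => true
  | (k, _) :: rest =>
    if cd.getD k 0 < cd1.getD k 0 then false else pvLoop3 cd cd1 rest

def generate_phrase (characters : String) (phrase : String) : Bool :=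
  let cs := characters.toList
  let ph := phrase.toList
  let tc : PySem.Set Char := PySem.Set.ofList cs
  let st := pvLoop1 cs tc
  let tc1 : PySem.Set Char := PySem.Set.ofList ph
  let st2 := pvLoop2 ph tc1 st
  pvLoop3 st2.1 st2.2 st2.1.items

-- ===== PORT B =====
-- 'for c in phrase: if c in pool: pool.remove(c) else: return False' — remove? is none
-- exactly when c is not in the pool, so the match is the membership test + remove.
def pvConsume (pool : List Char) : List Char → Bool
  | [] => true
  | c :: rest =>
    match PySem.List.remove? pool c with
    | some pool' => pvConsume pool' rest
    | none => false

def generate_phrase_alt (characters : String) (phrase : String) : Bool :=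
  pvConsume characters.toList phrase.toList

-- ===== PRECONDITION & SPEC =====
def Spec_generate_phrase (characters : String) (phrase : String) (out : Bool) : Prop := out = generate_phrase_alt characters phrase
instance (characters : String) (phrase : String) (out : Bool) : Decidable (Spec_generate_phrase characters phrase out) := by unfold Spec_generate_phrase; infer_instance

-- ===== CLAIM (what is proved, stated in full; the proofs are below) =====
def Claim_equal_generate_phrase : Prop := ∀ (characters : String) (phrase : String), Dom_generate_phrase characters phrase → Spec_generate_phrase characters phrase (generate_phrase characters phrase)

-- ===== LEMMAS AND PROOFS =====

lemma pvCountA_go (i : Char) (s : List Char) (a : Int) :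
    s.foldl (fun count j => if i == j then count + 1 else count) a = a + s.count i := by
  induction s generalizing a with
  | nil => simp
  | cons x t ih =>
    simp only [List.foldl_cons, List.count_cons]
    by_cases h : i = x
    · subst h
      simp only [BEq.rfl, if_true, ih]
      push_cast
      ring
    · have hx : (i == x) = false := by simp [h]
      have hx2 : (x == i) = false := by
        simp only [beq_eq_false_iff_ne, ne_eq]
        exact fun h' => h h'.symm
      simp only [hx, Bool.false_eq_true, if_false, ih, hx2, Nat.add_zero]

lemma pvCountA_eq (i : Char) (s : List Char) : pvCountA i s = (s.count i : Int) := by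
  rw [pvCountA, pvCountA_go]
  simp

lemma pvPairFoldl {α β γ : Type} (f : α → γ → α) (g : β → γ → β) (l : List γ)
    (a : α) (b : β) :
    l.foldl (fun p i => (f p.1 i, g p.2 i)) (a, b) = (l.foldl f a, l.foldl g b) := by
  induction l generalizing a b with
  | nil => rfl
  | cons x t ih => simp [List.foldl_cons, ih]

lemma pvGetD_foldl_insert (f : Char → Int) (l : List Char) (d : PySem.Dict Char Int)
    (k : Char) :
    (l.foldl (fun d i => d.insert i (f i)) d).getD k 0
      = if k ∈ l then f k else d.getD k 0 := by
  induction l generalizing d with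
  | nil => simp
  | cons a t ih =>
    simp only [List.foldl_cons, ih, List.mem_cons]
    by_cases hk : k ∈ t
    · simp [hk]
    · by_cases ha : k = a
      · simp [ha]
      · simp [hk, ha, PySem.Dict.getD_insert]

lemma pvGetD_foldl_guard (l : List Char) (d : PySem.Dict Char Int) (k : Char) :
    (l.foldl (fun d i => if d.contains i then d else d.insert i 0) d).getD k 0
      = d.getD k 0 := by
  induction l generalizing d with
  | nil => rfl
  | cons a t ih =>
    simp only [List.foldl_cons]
    by_cases hc : d.contains a
    · simp [hc, ih]
    · simp only [Bool.not_eq_true] at hc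
      simp only [hc, Bool.false_eq_true, if_false, ih]
      rw [PySem.Dict.getD_insert]
      by_cases ha : k = a
      · subst ha
        simp [PySem.Dict.getD_of_not_contains d 0 hc]
      · simp [ha]

lemma pvMem_keys_foldl_insert (f : Char → Int) (l : List Char)
    (d : PySem.Dict Char Int) (k : Char) :
    k ∈ (l.foldl (fun d i => d.insert i (f i)) d).keys ↔ k ∈ d.keys ∨ k ∈ l := by
  induction l generalizing d with
  | nil => simp
  | cons a t ih =>
    simp only [List.foldl_cons, ih, PySem.Dict.mem_keys_insert, List.mem_cons]
    tauto

lemma pvMem_keys_foldl_guard (l : List Char) (d : PySem.Dict Char Int) (k : Char) :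
    k ∈ (l.foldl (fun d i => if d.contains i then d else d.insert i 0) d).keys
      ↔ k ∈ d.keys ∨ k ∈ l := by
  induction l generalizing d with
  | nil => simp
  | cons a t ih =>
    simp only [List.foldl_cons, List.mem_cons]
    by_cases hc : d.contains a
    · have ha : a ∈ d.keys := (PySem.Dict.contains_iff_mem_keys d a).mp hc
      simp only [hc, if_true, ih]
      constructor
      · rintro (h | h) <;> tauto
      · rintro (h | h | h) <;> subst_vars <;> tauto
    · simp only [Bool.not_eq_true] at hc
      simp only [hc, Bool.false_eq_true, if_false, ih, PySem.Dict.mem_keys_insert]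
      tauto

lemma pvNodup_keys_foldl_guard (l : List Char) (d : PySem.Dict Char Int)
    (h : d.keys.Nodup) :
    (l.foldl (fun d i => if d.contains i then d else d.insert i 0) d).keys.Nodup := by
  induction l generalizing d with
  | nil => exact h
  | cons a t ih =>
    simp only [List.foldl_cons]
    by_cases hc : d.contains a
    · simpa [hc] using ih d h
    · simp only [Bool.not_eq_true] at hc
      simp only [hc, Bool.false_eq_true, if_false]
      exact ih _ (PySem.Dict.nodup_keys_insert d a 0 h)

lemma pvLoop3_eq_all (cd cd1 : PySem.Dict Char Int) (items : List (Char × Int)) :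
    pvLoop3 cd cd1 items
      = items.all (fun kv => decide (cd1.getD kv.1 0 ≤ cd.getD kv.1 0)) := by
  induction items with
  | nil => rfl
  | cons kv rest ih =>
    obtain ⟨k, v⟩ := kv
    simp only [pvLoop3, List.all_cons, ih]
    by_cases h : cd.getD k 0 < cd1.getD k 0
    · simp [h, not_le.mpr h]
    · simp [h, not_lt.mp h]

lemma pvConsume_iff (pool ph : List Char) :
    pvConsume pool ph = true ↔ ∀ c : Char, ph.count c ≤ pool.count c := by
  induction ph generalizing pool with
  | nil => simp [pvConsume]
  | cons c rest ih =>
    by_cases hc : c ∈ pool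
    · rw [pvConsume, PySem.List.remove?_eq_some_erase pool c hc]
      simp only [ih]
      constructor
      · intro h d
        have hd := h d
        rw [List.count_erase] at hd
        rw [List.count_cons]
        by_cases hdc : c = d
        · subst hdc
          have : 1 ≤ pool.count c := List.one_le_count_iff.mpr hc
          simp at hd ⊢
          omega
        · have : (c == d) = false := by simp [hdc]
          simp [this] at hd ⊢
          omega
      · intro h d
        have hd := h d
        rw [List.count_cons] at hd
        rw [List.count_erase]
        by_cases hdc : c = d
        · subst hdc
          simp at hd ⊢
          omega
        · have : (c == d) = false := by simp [hdc]
          simp [this] at hd ⊢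
          omega
    · rw [pvConsume]
      rw [(PySem.List.remove?_eq_none_iff pool c).mpr hc]
      simp only [Bool.false_eq_true, false_iff, not_forall, not_le]
      refine ⟨c, ?_⟩
      have h1 : (c :: rest).count c = rest.count c + 1 := by
        simp
      have h2 : pool.count c = 0 := List.count_eq_zero.mpr hc
      omega

lemma pvLoop1_eq (cs tc : List Char) :
    pvLoop1 cs tc
      = (tc.foldl (fun d i => d.insert i (pvCountA i cs)) PySem.Dict.empty,
         tc.foldl (fun d i => d.insert i 0) PySem.Dict.empty) := by
  rw [pvLoop1]
  exact pvPairFoldl (fun (d : PySem.Dict Char Int) (i : Char) => d.insert i (pvCountA i cs))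
    (fun (d : PySem.Dict Char Int) (i : Char) => d.insert i 0) tc _ _

lemma pvLoop2_eq (ph tc1 : List Char) (a b : PySem.Dict Char Int) :
    pvLoop2 ph tc1 (a, b)
      = (tc1.foldl (fun d i => if d.contains i then d else d.insert i 0) a,
         tc1.foldl (fun d i => d.insert i (pvCountA i ph)) b) := by
  rw [pvLoop2]
  exact pvPairFoldl (fun (d : PySem.Dict Char Int) (i : Char) => if d.contains i then d else d.insert i 0)
    (fun (d : PySem.Dict Char Int) (i : Char) => d.insert i (pvCountA i ph)) tc1 a b

lemma pvA_iff (cs ph : List Char) :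
    (pvLoop3 (pvLoop2 ph (PySem.Set.ofList ph) (pvLoop1 cs (PySem.Set.ofList cs))).1
      (pvLoop2 ph (PySem.Set.ofList ph) (pvLoop1 cs (PySem.Set.ofList cs))).2
      (pvLoop2 ph (PySem.Set.ofList ph) (pvLoop1 cs (PySem.Set.ofList cs))).1.items) = true
    ↔ ∀ c : Char, ph.count c ≤ cs.count c := by
  rw [pvLoop1_eq, pvLoop2_eq]
  simp only []
  set D1 : PySem.Dict Char Int :=
    (PySem.Set.ofList cs).foldl (fun d i => d.insert i (pvCountA i cs)) PySem.Dict.empty with hD1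
  set E1 : PySem.Dict Char Int :=
    (PySem.Set.ofList cs).foldl (fun d i => d.insert i 0) PySem.Dict.empty with hE1
  set CD : PySem.Dict Char Int :=
    (PySem.Set.ofList ph).foldl (fun d i => if d.contains i then d else d.insert i 0) D1 with hCDdef
  set CD1 : PySem.Dict Char Int :=
    (PySem.Set.ofList ph).foldl (fun d i => d.insert i (pvCountA i ph)) E1 with hCD1def
  have hCD : ∀ k, CD.getD k 0 = (cs.count k : Int) := by
    intro k
    rw [hCDdef, pvGetD_foldl_guard, hD1, pvGetD_foldl_insert]
    by_cases hk : k ∈ cs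
    · simp [PySem.Set.mem_ofList, hk, pvCountA_eq]
    · simp [PySem.Set.mem_ofList, hk, List.count_eq_zero.mpr hk]
  have hCD1 : ∀ k, CD1.getD k 0 = (ph.count k : Int) := by
    intro k
    rw [hCD1def, pvGetD_foldl_insert]
    by_cases hk : k ∈ ph
    · simp [PySem.Set.mem_ofList, hk, pvCountA_eq]
    · rw [hE1, pvGetD_foldl_insert]
      simp [PySem.Set.mem_ofList, hk, List.count_eq_zero.mpr hk]
  have hnd : CD.keys.Nodup := by
    rw [hCDdef]
    refine pvNodup_keys_foldl_guard _ _ ?_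
    rw [hD1]
    exact PySem.Dict.nodup_keys_foldl_insert _ _ _ (by simp)
  have hmem : ∀ k, k ∈ CD.keys ↔ k ∈ cs ∨ k ∈ ph := by
    intro k
    rw [hCDdef, pvMem_keys_foldl_guard, hD1, pvMem_keys_foldl_insert]
    simp [PySem.Set.mem_ofList]
  rw [PySem.Dict.items_eq_map_keys CD hnd 0, pvLoop3_eq_all, List.all_map,
    List.all_eq_true]
  simp only [Function.comp, decide_eq_true_eq]
  constructor
  · intro h c
    by_cases hcph : c ∈ ph
    · have hx := h c ((hmem c).mpr (Or.inr hcph))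
      rw [hCD, hCD1] at hx
      exact_mod_cast hx
    · simp [List.count_eq_zero.mpr hcph]
  · intro h k _
    rw [hCD, hCD1]
    exact_mod_cast h k

theorem generate_phrase_spec_aux (characters phrase : String) :
    generate_phrase characters phrase = generate_phrase_alt characters phrase := by
  rw [Bool.eq_iff_iff]
  exact (pvA_iff characters.toList phrase.toList).trans
    (pvConsume_iff characters.toList phrase.toList).symm

-- ===== VERDICT (by name: the statement is the Claim_ definition above) =====
theorem generate_phrase_spec : Claim_equal_generate_phrase := by
  intro characters phrase _
  exact generate_phrase_spec_aux characters phrase
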